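-- pv_equiv track=rewrite | github.com/leesumin7766/codingex | 프로그래머스/0/120843. 공 던지기/공 던지기.py | solution
-- ===== SOURCE A (Python) =====
-- def solution(numbers, k):
--     answer = 0
--     loc = 1
--     for i in range(k-1) :
--         if loc == len(numbers) - 1 :
--             loc = 1
--         elif loc == len(numbers) :
--             loc = 2
--         else :
--             loc += 2
--     return loc
-- ===== SOURCE B (Python) =====
-- def solution(numbers, k):
--     # position after k throws: start at 1, advance by 2 (mod n) each throw after the first
--     return (2 * max(k - 1, 0)) % len(numbers) + 1
-- ===== Notes on version B (the rewrite author's own statement) =====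
-- stated objective: faster
-- what changed: Replaces A's step-by-step simulation of k-1 throws (a loop with wrap-around branches) by the closed modular formula (2*max(k-1,0)) % len(numbers) + 1.
-- intended difference: On a one-element list with k >= 2, A returns 2*(k-1) (leftover loop state that keeps adding 2 past the end of the list), while B returns 1, the only position that exists and the intended answer for the ball-passing task. — e.g. on solution([7], 3): A returns 4, B returns 1
-- outside the precondition, e.g. on solution([], 3): A returns 5, B raises ZeroDivisionError
import Mathlib
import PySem

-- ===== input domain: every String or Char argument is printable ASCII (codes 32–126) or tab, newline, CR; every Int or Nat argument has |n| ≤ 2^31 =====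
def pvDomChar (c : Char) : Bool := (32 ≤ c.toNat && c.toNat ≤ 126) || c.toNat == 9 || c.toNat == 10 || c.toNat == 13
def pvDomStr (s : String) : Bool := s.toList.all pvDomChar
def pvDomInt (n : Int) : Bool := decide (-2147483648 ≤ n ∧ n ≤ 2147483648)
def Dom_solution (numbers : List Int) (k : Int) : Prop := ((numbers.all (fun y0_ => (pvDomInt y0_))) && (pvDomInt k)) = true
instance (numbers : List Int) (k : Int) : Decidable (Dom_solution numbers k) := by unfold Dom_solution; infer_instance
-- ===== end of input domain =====

-- B replaces A's O(k) step-by-step simulation loop with the O(1) closed modular formula (2*(k-1)) % n + 1.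
-- Return-value equivalence only; neither program mutates its arguments.

-- ===== PORT A =====
def solution (numbers : List Int) (k : Int) : Int :=
  (PySem.List.pyRange 0 (k - 1) 1).foldl
    (fun loc _ =>
      if loc = (numbers.length : Int) - 1 then 1
      else if loc = (numbers.length : Int) then 2
      else loc + 2) 1

-- ===== PORT B =====
def solution_alt (numbers : List Int) (k : Int) : Int :=
  PySem.Int.mod (2 * max (k - 1) 0) (numbers.length : Int) + 1

-- ===== PRECONDITION & SPEC =====
-- Pre_ excludes only the empty list, on which A returns 1 + 2*max(k-1,0) (the loop never hits a
-- wrap branch) while B raises ZeroDivisionError on the '% len(numbers)'.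
def Pre_solution (numbers : List Int) (k : Int) : Prop := numbers ≠ []
instance (numbers : List Int) (k : Int) : Decidable (Pre_solution numbers k) := by unfold Pre_solution; infer_instance
def pvWitness_solution : List Int × Int := ([3, 1, 2], 4)

-- On a one-element list with k ≥ 2, A returns 2*(k-1) (leftover loop state that keeps adding 2 past the
-- list), while B returns 1, the only position that exists — the intended value for the ball-passing task.
def D_solution (numbers : List Int) (k : Int) : Prop := numbers.length = 1 ∧ 2 ≤ k
instance (numbers : List Int) (k : Int) : Decidable (D_solution numbers k) := by unfold D_solution; infer_instance

def Spec_solution (numbers : List Int) (k : Int) (out : Int) : Prop :=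
  ¬ D_solution numbers k → out = solution_alt numbers k
instance (numbers : List Int) (k : Int) (out : Int) : Decidable (Spec_solution numbers k out) := by unfold Spec_solution; infer_instance

def pvDiffWitness_solution : List Int × Int := ([7], 3)
def pvDiffWitnessOut_solution : Int × Int := (4, 1)

-- ===== CLAIM (what is proved, stated in full; the proofs are below) =====
def Claim_unchanged_solution : Prop := ∀ (numbers : List Int) (k : Int), Dom_solution numbers k → Pre_solution numbers k → Spec_solution numbers k (solution numbers k)
def Claim_changed_solution : Prop := Dom_solution (pvDiffWitness_solution.1) (pvDiffWitness_solution.2) ∧ Pre_solution (pvDiffWitness_solution.1) (pvDiffWitness_solution.2) ∧ D_solution (pvDiffWitness_solution.1) (pvDiffWitness_solution.2) ∧ solution (pvDiffWitness_solution.1) (pvDiffWitness_solution.2) = pvDiffWitnessOut_solution.1 ∧ solution_alt (pvDiffWitness_solution.1) (pvDiffWitness_solution.2) = pvDiffWitnessOut_solution.2 ∧ pvDiffWitnessOut_solution.1 ≠ pvDiffWitnessOut_solution.2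
def Claim_exact_solution : Prop := ∀ (numbers : List Int) (k : Int), Dom_solution numbers k → Pre_solution numbers k → D_solution numbers k → solution numbers k ≠ solution_alt numbers k

-- ===== LEMMAS AND PROOFS =====

-- Loop invariant for A when len(numbers) = n ≥ 2: starting from (2*t) % n + 1, one step yields (2*(t+1)) % n + 1.
lemma step_invariant (n t : Int) (hn : 2 ≤ n) (_ : 0 ≤ t) :
    (if 2 * t % n + 1 = n - 1 then (1 : Int)
     else if 2 * t % n + 1 = n then 2
     else 2 * t % n + 1 + 2) = 2 * (t + 1) % n + 1 := by
  have hb : (0 : Int) < n := by omega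
  have h1 : 0 ≤ 2 * t % n := Int.emod_nonneg _ (by omega)
  have h2 : 2 * t % n < n := Int.emod_lt_of_pos _ hb
  have hsplit : 2 * (t + 1) % n = (2 * t % n + 2) % n := by
    have : 2 * (t + 1) = 2 * t + 2 := by ring
    rw [this, Int.add_emod, Int.add_emod (2 * t % n) 2, Int.emod_emod_of_dvd _ (dvd_refl n)]
  rw [hsplit]
  split_ifs with hA hB
  · have h3 : (2 * t % n + 2) % n = 0 := by
      rw [show 2 * t % n + 2 = n by omega]; exact Int.emod_self
    omega
  · have h3 : (2 * t % n + 2) % n = 1 := by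
      rw [show 2 * t % n + 2 = 1 + n * 1 by omega, Int.add_mul_emod_self_left]
      exact Int.emod_eq_of_lt (by omega) (by omega)
    omega
  · have h3 : (2 * t % n + 2) % n = 2 * t % n + 2 :=
      Int.emod_eq_of_lt (by omega) (by omega)
    omega

lemma foldl_step (n : Int) (hn : 2 ≤ n) (l : List Int) :
    ∀ (t : Int), 0 ≤ t →
      l.foldl (fun loc _ =>
        if loc = n - 1 then (1 : Int) else if loc = n then 2 else loc + 2) (2 * t % n + 1)
        = 2 * (t + l.length) % n + 1 := by
  induction l with
  | nil => intro t ht; simp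
  | cons x xs ih =>
    intro t ht
    simp only [List.foldl_cons]
    rw [step_invariant n t hn ht, ih (t + 1) (by omega)]
    congr 2
    simp only [List.length_cons]
    push_cast
    ring

-- A, when the list has n ≥ 2 elements, computes (2*(k-1)) % n + 1 for k ≥ 2.
lemma solution_closed (numbers : List Int) (k : Int) (hn : 2 ≤ (numbers.length : Int)) (hk : 2 ≤ k) :
    solution numbers k = 2 * (k - 1) % (numbers.length : Int) + 1 := by
  have h := foldl_step (numbers.length : Int) hn (PySem.List.pyRange 0 (k - 1) 1) 0 le_rfl
  simp only [mul_zero, Int.zero_emod, zero_add] at h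
  rw [PySem.List.length_pyRange_one] at h
  unfold solution
  rw [h, show (((k - 1 - 0).toNat : Int)) = k - 1 from by omega]

-- A's loop on a one-element list: from any start ≥ 2 each step just adds 2.
lemma foldl_step_one (l : List Int) :
    ∀ (c : Int), 2 ≤ c →
      l.foldl (fun loc _ =>
        if loc = (0 : Int) then (1 : Int) else if loc = 1 then 2 else loc + 2) c
        = c + 2 * l.length := by
  induction l with
  | nil => intro c hc; simp
  | cons x xs ih =>
    intro c hc
    simp only [List.foldl_cons]
    rw [if_neg (by omega), if_neg (by omega), ih (c + 2) (by omega)]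
    simp only [List.length_cons]
    push_cast
    ring

lemma solution_singleton (numbers : List Int) (k : Int) (hn : numbers.length = 1) (hk : 2 ≤ k) :
    solution numbers k = 2 * (k - 1) := by
  unfold solution
  rw [PySem.List.pyRange_one_cons (by omega)]
  simp only [List.foldl_cons, hn, Nat.cast_one]
  norm_num
  rw [foldl_step_one _ 2 le_rfl, PySem.List.length_pyRange_one]
  omega

lemma alt_closed (numbers : List Int) (k : Int) (hn : 1 ≤ (numbers.length : Int)) :
    solution_alt numbers k = 2 * max (k - 1) 0 % (numbers.length : Int) + 1 := by
  unfold solution_alt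
  rw [PySem.Int.mod_eq_emod_of_pos (by omega)]

-- ===== VERDICT (by name: the statement is the Claim_ definition above) =====
theorem solution_spec : Claim_unchanged_solution := by
  intro numbers k _ hpre hnd
  have hlen : 1 ≤ (numbers.length : Int) := by
    have : numbers.length ≠ 0 := fun h => hpre (List.eq_nil_of_length_eq_zero h)
    omega
  rw [alt_closed numbers k hlen]
  by_cases hk : 2 ≤ k
  · have hn2 : 2 ≤ (numbers.length : Int) := by
      unfold D_solution at hnd
      have : numbers.length ≠ 1 := fun h => hnd ⟨h, hk⟩
      omega
    rw [solution_closed numbers k hn2 hk]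
    congr 2
    omega
  · -- k ≤ 1: the loop body never runs, A returns 1; B computes 0 % n + 1 = 1
    unfold solution
    have : PySem.List.pyRange 0 (k - 1) 1 = [] := by
      rw [PySem.List.pyRange_one]
      simp
      omega
    rw [this]
    simp [show max (k - 1) 0 = 0 by omega]

theorem solution_changed : Claim_changed_solution := by
  unfold Claim_changed_solution; decide

theorem solution_tight : Claim_exact_solution := by
  intro numbers k _ _ hd
  obtain ⟨hn, hk⟩ := hd
  rw [solution_singleton numbers k hn hk,
    alt_closed numbers k (by omega)]
  have : 2 * max (k - 1) 0 % ((numbers.length : Int)) = 0 := by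
    rw [hn]; simp
  omega
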